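-- pv_equiv track=rewrite | github.com/MNametissa/swoosh | swoosh/modules/release.py | suggest_bump_type
-- ===== SOURCE A (Python) =====
-- def detect_breaking_changes(commits: list[dict]) -> bool:
--     """Detect breaking changes from commit messages."""
--     for commit in commits:
--         msg = commit["message"].lower()
--         # Conventional commits breaking change indicators
--         if "!" in msg.split(":")[0] if ":" in msg else False:
--             return True
--         if "breaking change" in msg:
--             return True
--         if "breaking:" in msg:
--             return True
--     return False
--
-- def suggest_bump_type(commits: list[dict]) -> str:
--     """Suggest version bump type based on commits."""
--     has_breaking = detect_breaking_changes(commits)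
--     has_feat = any(c["message"].startswith("feat") for c in commits)
--     has_fix = any(c["message"].startswith("fix") for c in commits)
--
--     if has_breaking:
--         return "major"
--     elif has_feat:
--         return "minor"
--     elif has_fix:
--         return "patch"
--     return "patch"
-- ===== SOURCE B (Python) =====
-- def suggest_bump_type(commits: list[dict]) -> str:
--     """Suggest version bump type based on commits (single pass, early exit on breaking)."""
--     has_feat = False
--     for c in commits:
--         msg = c["message"].lower()
--         if ":" in msg and "!" in msg.split(":")[0]:
--             return "major"
--         if "breaking change" in msg or "breaking:" in msg:
--             return "major"
--         if c["message"].startswith("feat"):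
--             has_feat = True
--     return "minor" if has_feat else "patch"
-- ===== Notes on version B (the rewrite author's own statement) =====
-- stated objective: simpler
-- what changed: Fuses A's three separate scans (detect_breaking_changes plus two any() passes) into one loop that returns 'major' immediately on a breaking indicator and tracks only a has_feat flag, dropping the has_fix pass entirely since both the fix branch and the default return 'patch'.
-- outside the precondition, e.g. on suggest_bump_type([{'message': 'breaking: x'}, {}]): A raises KeyError, B returns 'major'
import Mathlib
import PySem

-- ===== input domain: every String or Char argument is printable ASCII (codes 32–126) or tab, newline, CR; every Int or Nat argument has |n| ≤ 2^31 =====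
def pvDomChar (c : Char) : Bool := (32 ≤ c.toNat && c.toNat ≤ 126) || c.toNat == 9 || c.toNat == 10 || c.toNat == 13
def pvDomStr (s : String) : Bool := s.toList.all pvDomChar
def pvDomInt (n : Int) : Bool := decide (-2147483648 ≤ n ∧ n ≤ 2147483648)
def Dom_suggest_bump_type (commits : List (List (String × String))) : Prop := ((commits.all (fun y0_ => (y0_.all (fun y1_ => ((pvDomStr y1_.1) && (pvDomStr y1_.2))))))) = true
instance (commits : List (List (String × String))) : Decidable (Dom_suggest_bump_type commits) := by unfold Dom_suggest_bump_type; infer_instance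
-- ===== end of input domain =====

-- B fuses A's three scans into one loop with an early 'major' return and a single has_feat flag
-- (the has_fix scan is dropped: fix and the default both yield "patch"); same return value on Pre_.

-- ===== PORT A =====
-- c["message"]: KeyError when the key is missing — those inputs are excluded by Pre_; "" there is arbitrary.
def pvMsg (c : List (String × String)) : String :=
  match c.lookup "message" with
  | some m => m
  | none => ""

def detect_breaking_changes (commits : List (List (String × String))) : Bool :=
  match commits with
  | [] => false
  | c :: rest =>
    let msg := PySem.Str.lower (pvMsg c)
    if (if PySem.Str.isIn ":" msg
        then PySem.Str.isIn "!" (((PySem.Str.split? msg ":").getD []).headD "")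
        else false) then true
    else if PySem.Str.isIn "breaking change" msg then true
    else if PySem.Str.isIn "breaking:" msg then true
    else detect_breaking_changes rest

def suggest_bump_type (commits : List (List (String × String))) : String :=
  let has_breaking := detect_breaking_changes commits
  let has_feat := commits.any (fun c => PySem.Str.startswith (pvMsg c) "feat")
  let has_fix := commits.any (fun c => PySem.Str.startswith (pvMsg c) "fix")
  if has_breaking then "major"
  else if has_feat then "minor"
  else if has_fix then "patch"
  else "patch"

-- ===== PORT B =====
def suggest_bump_type_alt_go (commits : List (List (String × String))) (hasFeat : Bool) : String :=
  match commits with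
  | [] => if hasFeat then "minor" else "patch"
  | c :: rest =>
    let msg := PySem.Str.lower (pvMsg c)
    if PySem.Str.isIn ":" msg && PySem.Str.isIn "!" (((PySem.Str.split? msg ":").getD []).headD "") then "major"
    else if PySem.Str.isIn "breaking change" msg || PySem.Str.isIn "breaking:" msg then "major"
    else suggest_bump_type_alt_go rest (hasFeat || PySem.Str.startswith (pvMsg c) "feat")

def suggest_bump_type_alt (commits : List (List (String × String))) : String :=
  suggest_bump_type_alt_go commits false

-- ===== PRECONDITION & SPEC =====
-- Pre_ excludes commits lacking a "message" key, on which A raises KeyError.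
def Pre_suggest_bump_type (commits : List (List (String × String))) : Prop :=
  ∀ c ∈ commits, (c.lookup "message").isSome = true
instance (commits : List (List (String × String))) : Decidable (Pre_suggest_bump_type commits) := by
  unfold Pre_suggest_bump_type; infer_instance

def pvWitness_suggest_bump_type : (List (List (String × String))) := [[("message", "feat: add")]]

def Spec_suggest_bump_type (commits : List (List (String × String))) (out : String) : Prop := out = suggest_bump_type_alt commits
instance (commits : List (List (String × String))) (out : String) : Decidable (Spec_suggest_bump_type commits out) := by unfold Spec_suggest_bump_type; infer_instance

-- ===== CLAIM (what is proved, stated in full; the proofs are below) =====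
def Claim_equal_suggest_bump_type : Prop := ∀ (commits : List (List (String × String))), Dom_suggest_bump_type commits → Pre_suggest_bump_type commits → Spec_suggest_bump_type commits (suggest_bump_type commits)

-- ===== LEMMAS AND PROOFS =====

-- B's loop, characterised by A's three quantities.
theorem ite_false_eq_and (a b : Bool) : (if a then b else false) = (a && b) := by cases a <;> rfl

theorem alt_go_eq (commits : List (List (String × String))) (hf : Bool) :
    suggest_bump_type_alt_go commits hf =
      if detect_breaking_changes commits then "major"
      else if hf || commits.any (fun c => PySem.Str.startswith (pvMsg c) "feat") then "minor"
      else "patch" := by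
  induction commits generalizing hf with
  | nil => cases hf <;> rfl
  | cons c rest ih =>
    simp only [suggest_bump_type_alt_go, detect_breaking_changes, List.any_cons,
      ite_false_eq_and]
    generalize PySem.Str.isIn ":" (PySem.Str.lower (pvMsg c)) = a1
    generalize PySem.Str.isIn "!" (((PySem.Str.split? (PySem.Str.lower (pvMsg c)) ":").getD []).headD "") = a2
    generalize PySem.Str.isIn "breaking change" (PySem.Str.lower (pvMsg c)) = a3
    generalize PySem.Str.isIn "breaking:" (PySem.Str.lower (pvMsg c)) = a4
    cases a1 <;> cases a2 <;> cases a3 <;> cases a4 <;>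
      (try simp only [ih, Bool.or_assoc]) <;> rfl

-- ===== VERDICT (by name: the statement is the Claim_ definition above) =====
theorem suggest_bump_type_spec : Claim_equal_suggest_bump_type := by
  intro commits _ _
  unfold Spec_suggest_bump_type suggest_bump_type suggest_bump_type_alt
  rw [alt_go_eq]
  simp only [Bool.false_or]
  split_ifs <;> rfl
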